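-- pv_equiv track=rewrite | github.com/Ting-chien/leetcode | interviews/TrendMicro/q1.py | solution
-- ===== SOURCE A (Python) =====
-- def solution(A):
--     # write your code in Python 3.6
--
--     # If len=1
--     if len(A) == 1: return 0
--
--     i, count = 0, 0
--     arr = A + [A[0]]
--     while i < len(arr) - 1:
--         if (arr[i] + arr[i+1]) % 2 == 0:
--             count += 1
--             arr = arr[:i] + arr[i+2:]
--             continue
--         i += 1
--
--     return count
-- ===== SOURCE B (Python) =====
-- def solution(A):
--     n = len(A)
--     if n == 1:
--         return 0
--     ext = A + A[:1]
--     count = 0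
--     p = 0
--     while p < n:
--         if (ext[p] + ext[p + 1]) % 2 == 0:
--             count += 1
--             p += 2
--         else:
--             p += 1
--     return count
-- ===== Notes on version B (the rewrite author's own statement) =====
-- stated objective: faster
-- what changed: Replaces A's delete-matched-pair-by-list-slicing loop with a single pointer scan over the extended array built once (advance by 2 on a parity match, else by 1), removing all O(n) slice copies.
import Mathlib
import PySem

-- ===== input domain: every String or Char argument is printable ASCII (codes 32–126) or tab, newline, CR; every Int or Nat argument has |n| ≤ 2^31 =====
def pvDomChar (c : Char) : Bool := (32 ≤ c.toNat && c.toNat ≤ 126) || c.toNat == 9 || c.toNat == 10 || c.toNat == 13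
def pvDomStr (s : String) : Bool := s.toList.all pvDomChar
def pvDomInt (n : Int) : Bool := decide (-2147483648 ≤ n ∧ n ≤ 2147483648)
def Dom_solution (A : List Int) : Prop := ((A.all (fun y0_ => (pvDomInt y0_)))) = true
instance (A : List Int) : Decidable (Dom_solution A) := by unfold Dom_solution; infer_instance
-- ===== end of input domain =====

-- B replaces A's quadratic delete-by-slicing loop with a single O(n) pointer scan (p+=2 on a parity
-- match, p+=1 otherwise) over the once-built extended array: asymptotically faster, same values.


-- ===== PORT A =====
-- A's while loop. The loop index i and count are nonnegative throughout the Python run, so they are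
-- carried as Nat; arr[i] is ported as getD (always in range under the loop condition, where Python
-- never raises), and arr[:i] + arr[i+2:] as take/drop (exact for nonnegative indices).
def solLoopA (arr : List Int) (i count : Nat) : Int :=
  if i + 1 < arr.length then
    if (arr.getD i 0 + arr.getD (i + 1) 0) % 2 == 0 then
      solLoopA (arr.take i ++ arr.drop (i + 2)) i (count + 1)
    else
      solLoopA arr (i + 1) count
  else
    (count : Int)
termination_by arr.length - i
decreasing_by
  · simp only [List.length_append, List.length_take, List.length_drop]; omega
  · omega

def solution (A : List Int) : Int :=
  if A.length = 1 then 0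
  else
    match A.head? with   -- the first-element access; Python raises IndexError on the empty list (excluded by Pre_solution)
    | none => 0
    | some a0 => solLoopA (A ++ [a0]) 0 0

-- ===== PORT B =====
def solLoopB (ext : List Int) (n p count : Nat) : Int :=
  if p < n then
    if (ext.getD p 0 + ext.getD (p + 1) 0) % 2 == 0 then
      solLoopB ext n (p + 2) (count + 1)
    else
      solLoopB ext n (p + 1) count
  else
    (count : Int)
termination_by n - p

def solution_alt (A : List Int) : Int :=
  if A.length = 1 then 0
  else
    let ext := A ++ A.take 1
    solLoopB ext A.length 0 0

-- ===== PRECONDITION & SPEC =====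
-- Pre_ excludes only the empty list, on which A raises IndexError at its first-element access.
def Pre_solution (A : List Int) : Prop := A ≠ []
instance (A : List Int) : Decidable (Pre_solution A) := by unfold Pre_solution; infer_instance
def pvWitness_solution : List Int := [2, 4, 3, 5, 1]

def Spec_solution (A : List Int) (out : Int) : Prop := out = solution_alt A
instance (A : List Int) (out : Int) : Decidable (Spec_solution A out) := by unfold Spec_solution; infer_instance

-- ===== CLAIM (what is proved, stated in full; the proofs are below) =====
def Claim_equal_solution : Prop := ∀ (A : List Int), Dom_solution A → Pre_solution A → Spec_solution A (solution A)
-- ===== LEMMAS AND PROOFS =====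

-- Invariant linking the two loops: A's state is (survivors S ++ ext.drop p), i = S.length,
-- where p = i + 2·count is B's pointer into the fixed extended array.
theorem loop_eq (ext : List Int) (n : Nat) (hn : ext.length = n + 1)
    (p : Nat) (S : List Int) (c : Nat) :
    solLoopA (S ++ ext.drop p) S.length c = solLoopB ext n p c := by
  generalize hm : n - p = m
  induction m using Nat.strong_induction_on generalizing p S c with
  | _ m ih =>
  subst hm
  rw [solLoopA, solLoopB]
  by_cases hp : p < n
  · have hlen : (S ++ ext.drop p).length = S.length + (n + 1 - p) := by
      simp [List.length_drop, hn]
    have hA : S.length + 1 < (S ++ ext.drop p).length := by omega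
    have hpe : p < ext.length := by omega
    have hg0 : (S ++ ext.drop p).getD S.length 0 = ext.getD p 0 := by
      have := List.getD_append_right (l := S) (l' := ext.drop p) (n := S.length)
        (d := (0:Int)) le_rfl
      simpa [List.getD_eq_getElem?_getD, List.getElem?_drop] using this
    have hg1 : (S ++ ext.drop p).getD (S.length + 1) 0 = ext.getD (p + 1) 0 := by
      have := List.getD_append_right (l := S) (l' := ext.drop p) (n := S.length + 1)
        (d := (0:Int)) (by omega)
      simpa [List.getD_eq_getElem?_getD, List.getElem?_drop] using this
    simp only [if_pos hA, if_pos hp, hg0, hg1]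
    by_cases hpar : ((ext.getD p 0 + ext.getD (p + 1) 0) % 2 == 0) = true
    · simp only [if_pos hpar]
      have hslice : (S ++ ext.drop p).take S.length ++ (S ++ ext.drop p).drop (S.length + 2)
          = S ++ ext.drop (p + 2) := by
        rw [List.take_left]
        congr 1
        have h2 : (S ++ ext.drop p).drop (S.length + 2) = (ext.drop p).drop 2 := by
          simp [List.drop_append]
        rw [h2, List.drop_drop]
      rw [hslice, ih (n - (p + 2)) (by omega) (p + 2) S (c + 1) rfl]
    · simp only [if_neg hpar]
      have hcons : ext.drop p = ext.getD p 0 :: ext.drop (p + 1) := by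
        rw [List.drop_eq_getElem_cons hpe, List.getD_eq_getElem]
      have harr : S ++ ext.drop p = (S ++ [ext.getD p 0]) ++ ext.drop (p + 1) := by
        rw [hcons]; simp
      have hi : S.length + 1 = (S ++ [ext.getD p 0]).length := by simp
      rw [harr, hi, ih (n - (p + 1)) (by omega) (p + 1) (S ++ [ext.getD p 0]) c rfl]
  · have hlen : (S ++ ext.drop p).length ≤ S.length + 1 := by
      simp only [List.length_append, List.length_drop, hn]; omega
    rw [if_neg (by omega), if_neg hp]

theorem solution_spec : Claim_equal_solution := by
  intro A _ hA
  unfold Spec_solution solution solution_alt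
  by_cases h1 : A.length = 1
  · simp [h1]
  · match A, hA with
    | a0 :: rest, _ =>
      simp only [List.head?_cons, if_neg h1]
      have := loop_eq ((a0 :: rest) ++ [a0]) (a0 :: rest).length (by simp) 0 [] 0
      simpa using this
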